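-- pv_equiv track=rewrite | github.com/5uperb0y/rosalind | code/sseq/sseq.py | sseq
-- ===== SOURCE A (Python) =====
-- def sseq(dna, motif):
--     """Finding the first position of a spliced motif in a DNA string.
--
--     Args:
--         dna (str): A DNA string.
--         motif (str): A DNA motif to be found in the dna string.
--
--     Return:
--         list: A list of 1-based positions where the motif is found as
--               a subsequence in the DNA string.
--     """
--     motif_pos = []
--     for pos, nt in enumerate(dna):
--         if motif:
--             if nt == motif[0]:
--                 motif_pos.append(pos + 1)
--                 motif = motif[1:]
--             else:
--                 pass
--         else:
--             break
--     return motif_pos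
-- ===== SOURCE B (Python) =====
-- def sseq(dna, motif):
--     positions = []
--     cursor = 0
--     for c in motif:
--         idx = dna.find(c, cursor)
--         if idx == -1:
--             break
--         positions.append(idx + 1)
--         cursor = idx + 1
--     return positions
-- ===== Notes on version B (the rewrite author's own statement) =====
-- stated objective: faster
-- what changed: Instead of stepping through every dna character and shrinking motif by repeated slicing, B iterates over motif and jumps forward through dna with str.find(c, cursor).
import Mathlib
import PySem

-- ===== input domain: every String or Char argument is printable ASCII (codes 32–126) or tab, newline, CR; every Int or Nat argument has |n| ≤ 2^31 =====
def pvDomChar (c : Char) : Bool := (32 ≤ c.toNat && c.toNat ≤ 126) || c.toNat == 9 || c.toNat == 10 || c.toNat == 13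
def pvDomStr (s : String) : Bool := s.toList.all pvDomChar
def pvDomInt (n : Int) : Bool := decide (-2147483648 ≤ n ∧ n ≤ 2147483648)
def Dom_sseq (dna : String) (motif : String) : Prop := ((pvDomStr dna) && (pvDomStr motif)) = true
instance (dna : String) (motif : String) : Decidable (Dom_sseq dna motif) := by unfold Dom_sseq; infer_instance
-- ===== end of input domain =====

-- B replaces A's per-nucleotide scan of dna (with repeated motif slicing) by a motif-driven
-- loop of forward jumps via str.find(c, cursor); same return value, stated and proved below.

-- ===== PORT A =====
-- loop over dna with position, consuming the motif: the enumerate loop of A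
def sseqLoopA : List Char → Nat → List Char → List Int
  | [], _, _ => []
  | _ :: _, _, [] => []                                  -- `else: break` (motif exhausted)
  | nt :: rest, pos, c :: m =>
    if nt = c then ((pos : Int) + 1) :: sseqLoopA rest (pos + 1) m
    else sseqLoopA rest (pos + 1) (c :: m)

def sseq (dna : String) (motif : String) : List Int :=
  sseqLoopA dna.toList 0 motif.toList

-- ===== PORT B =====
-- loop over motif with a cursor into dna; dna.find(c, cursor) is PySem.Chars.findFrom
def sseqLoopB (dna : List Char) : List Char → Nat → List Int
  | [], _ => []
  | c :: m, cur =>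
    let idx := PySem.Chars.findFrom dna [c] (cur : Int) none
    if idx = -1 then []
    else (idx + 1) :: sseqLoopB dna m (idx.toNat + 1)

def sseq_alt (dna : String) (motif : String) : List Int :=
  sseqLoopB dna.toList motif.toList 0

-- ===== PRECONDITION & SPEC =====
def Spec_sseq (dna : String) (motif : String) (out : List Int) : Prop := out = sseq_alt dna motif
instance (dna : String) (motif : String) (out : List Int) : Decidable (Spec_sseq dna motif out) := by unfold Spec_sseq; infer_instance

-- ===== CLAIM (what is proved, stated in full; the proofs are below) =====
def Claim_equal_sseq : Prop := ∀ (dna : String) (motif : String), Dom_sseq dna motif → Spec_sseq dna motif (sseq dna motif)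

-- ===== LEMMAS AND PROOFS =====

-- motif [] ends A's loop regardless of the remaining dna
lemma sseqLoopA_nil_motif (suff : List Char) (pos : Nat) : sseqLoopA suff pos [] = [] := by
  cases suff <;> rfl

-- if c never occurs in suff, A's loop on c::m returns []
lemma sseqLoopA_not_mem (suff : List Char) (pos : Nat) (c : Char) (m : List Char)
    (h : ∀ i, ¬ [c] <+: suff.drop i) : sseqLoopA suff pos (c :: m) = [] := by
  induction suff generalizing pos with
  | nil => rfl
  | cons x xs ih =>
    have hx : x ≠ c := by
      intro hxc; exact h 0 (by simp [hxc])
    simp only [sseqLoopA, if_neg hx]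
    exact ih (pos + 1) (fun i => h (i + 1))

-- if the FIRST occurrence of c in suff is at index j, A's loop emits pos+j+1 and continues after it
lemma sseqLoopA_first_occ (suff : List Char) (pos : Nat) (c : Char) (m : List Char) (j : Nat)
    (h1 : [c] <+: suff.drop j) (h2 : ∀ i < j, ¬ [c] <+: suff.drop i) :
    sseqLoopA suff pos (c :: m) = ((pos : Int) + j + 1) :: sseqLoopA (suff.drop (j + 1)) (pos + j + 1) m := by
  induction suff generalizing pos j with
  | nil => simp at h1
  | cons x xs ih =>
    cases j with
    | zero =>
      have hx : x = c := by
        rcases h1 with ⟨t, ht⟩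
        simpa using congrArg (·.head?) ht.symm
      subst hx
      simp [sseqLoopA]
    | succ j' =>
      have hx : x ≠ c := by
        intro hxc
        exact h2 0 (Nat.succ_pos _) (by simp [hxc])
      simp only [sseqLoopA, if_neg hx, List.drop_succ_cons]
      rw [ih (pos + 1) j' h1 (fun i hi => h2 (i + 1) (by omega))]
      have hn : pos + 1 + j' + 1 = pos + (j' + 1) + 1 := by omega
      rw [hn]
      congr 1
      push_cast; ring

-- main loop correspondence: B's cursor loop equals A's scan of the suffix from the cursor
lemma sseqLoop_eq (m : List Char) (dna : List Char) (cur : Nat) (hcur : cur ≤ dna.length) :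
    sseqLoopB dna m cur = sseqLoopA (dna.drop cur) cur m := by
  induction m generalizing cur with
  | nil => simp [sseqLoopB, sseqLoopA_nil_motif]
  | cons c m ih =>
    have hff := PySem.Chars.findFrom_natCast dna [c] cur hcur
    by_cases hfind : PySem.Chars.find (dna.drop cur) [c] = -1
    · have hno : ¬ [c] <:+: dna.drop cur := (PySem.Chars.find_eq_neg_one_iff _ _).mp hfind
      have hnone : ∀ i, ¬ [c] <+: (dna.drop cur).drop i := by
        intro i hi
        exact absurd ((PySem.Chars.exists_prefix_drop_iff_isIn _ _).mp ⟨i, hi⟩)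
          (by simpa [PySem.Chars.isIn_eq_false_iff _ _] using hno)
      simp only [sseqLoopB, hff, if_pos hfind]
      exact (sseqLoopA_not_mem _ cur c m hnone).symm
    · have hpos : 0 ≤ PySem.Chars.find (dna.drop cur) [c] := by
        have := PySem.Chars.neg_one_le_find (dna.drop cur) [c]
        omega
      obtain ⟨hpre, hmin⟩ := PySem.Chars.find_spec (s := dna.drop cur) (sub := [c]) hpos
      set j : Nat := (PySem.Chars.find (dna.drop cur) [c]).toNat with hj
      have hjval : PySem.Chars.find (dna.drop cur) [c] = (j : Int) := by omega
      have hjlt : j < (dna.drop cur).length := by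
        rcases hpre with ⟨t, ht⟩
        have h0 : 0 < ((dna.drop cur).drop j).length := by rw [← ht]; simp
        simp only [List.length_drop] at h0 ⊢
        omega
      have hne : (PySem.Chars.findFrom dna [c] (cur : Int) none) = (cur : Int) + j := by
        rw [hff, if_neg hfind, hjval]
      have hcur' : cur + j + 1 ≤ dna.length := by
        have h := hjlt
        rw [List.length_drop] at h
        omega
      simp only [sseqLoopB, hne]
      have hnn : ¬ ((cur : Int) + j = -1) := by omega
      rw [if_neg hnn]
      have htn : ((cur : Int) + j).toNat = cur + j := by omega
      rw [htn, ih (cur + j + 1) hcur',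
        sseqLoopA_first_occ (dna.drop cur) cur c m j hpre hmin, List.drop_drop]
      have hd : cur + (j + 1) = cur + j + 1 := by omega
      rw [hd]

-- ===== VERDICT (by name: the statement is the Claim_ definition above) =====
theorem sseq_spec : Claim_equal_sseq := by
  intro dna motif _
  unfold Spec_sseq sseq sseq_alt
  rw [sseqLoop_eq motif.toList dna.toList 0 (Nat.zero_le _)]
  simp
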